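-- pv_equiv track=rewrite | github.com/jisang0706/Dynamic-Heterogeneous-MEC-Offloading | src/visualize.py | _looks_like_paper_selection
-- ===== SOURCE A (Python) =====
-- from typing import Any
--
-- PAPER_VARIANT_GROUPS = (
--     ("A9", "A9_NOROLE"),
--     ("B1",),
--     ("QAG",),
-- )
--
-- def _variant_identifier(item: dict[str, Any]) -> str:
--     raw_variant = item.get("variant_id")
--     if raw_variant is not None:
--         return str(raw_variant)
--     raw_label = item.get("label", "run")
--     return str(raw_label)
--
-- def _is_paper_variant(variant_id: str) -> bool:
--     return any(variant_id in group for group in PAPER_VARIANT_GROUPS)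
--
-- def _looks_like_paper_selection(aggregated: list[dict[str, Any]]) -> bool:
--     if not aggregated:
--         return False
--     variant_ids = {_variant_identifier(item) for item in aggregated}
--     if not all(_is_paper_variant(variant_id) for variant_id in variant_ids):
--         return False
--     return (
--         any(variant_id in PAPER_VARIANT_GROUPS[0] for variant_id in variant_ids)
--         and any(variant_id in PAPER_VARIANT_GROUPS[1] for variant_id in variant_ids)
--         and any(variant_id in PAPER_VARIANT_GROUPS[2] for variant_id in variant_ids)
--     )
-- ===== SOURCE B (Python) =====
-- _GROUP_OF = {"A9": 0, "A9_NOROLE": 0, "B1": 1, "QAG": 2}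
--
-- def _looks_like_paper_selection(aggregated):
--     g0 = g1 = g2 = False
--     for item in aggregated:
--         raw = item.get("variant_id")
--         variant = str(raw) if raw is not None else str(item.get("label", "run"))
--         idx = _GROUP_OF.get(variant)
--         if idx is None:
--             return False
--         if idx == 0:
--             g0 = True
--         elif idx == 1:
--             g1 = True
--         else:
--             g2 = True
--     return g0 and g1 and g2
-- ===== Notes on version B (the rewrite author's own statement) =====
-- stated objective: simpler
-- what changed: Replaces the dedup-set build plus one all-scan and three any-scans over PAPER_VARIANT_GROUPS with a single early-exit pass over the items that looks each variant up in a precomputed variant->group-index dict and tracks three coverage flags.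
import Mathlib
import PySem

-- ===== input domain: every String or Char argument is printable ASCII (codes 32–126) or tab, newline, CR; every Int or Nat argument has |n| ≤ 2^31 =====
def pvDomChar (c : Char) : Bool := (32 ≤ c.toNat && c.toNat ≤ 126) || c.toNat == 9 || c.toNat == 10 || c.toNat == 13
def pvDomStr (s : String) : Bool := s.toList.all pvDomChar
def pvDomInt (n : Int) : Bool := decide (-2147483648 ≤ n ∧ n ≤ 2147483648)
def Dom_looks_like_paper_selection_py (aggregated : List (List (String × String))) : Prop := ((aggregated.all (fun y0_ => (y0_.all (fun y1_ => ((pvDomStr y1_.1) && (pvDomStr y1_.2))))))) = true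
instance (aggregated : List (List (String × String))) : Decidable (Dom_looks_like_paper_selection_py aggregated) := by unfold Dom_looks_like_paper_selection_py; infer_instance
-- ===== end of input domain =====

-- B replaces A's dedup-set build plus one all-scan and three any-scans with a single
-- early-exit pass using a variant->group-index dict and three coverage flags (objective: simpler).

-- ===== PORT A =====
-- PAPER_VARIANT_GROUPS (tuple of tuples of strings)
def pvPaperVariantGroups : List (List String) := [["A9", "A9_NOROLE"], ["B1"], ["QAG"]]

-- _variant_identifier: item.get("variant_id"), else item.get("label", "run"); on this domain
-- the dict values are strings, so str(...) is the identity.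
def pvVariantIdentifier (item : List (String × String)) : String :=
  match (PySem.Dict.mk item).get? "variant_id" with
  | some rawVariant => rawVariant
  | none => (PySem.Dict.mk item).getD "label" "run"

-- _is_paper_variant: any(variant_id in group for group in PAPER_VARIANT_GROUPS)
def pvIsPaperVariant (variantId : String) : Bool :=
  pvPaperVariantGroups.any (fun group => group.contains variantId)

def looks_like_paper_selection_py (aggregated : List (List (String × String))) : Bool :=
  if aggregated.isEmpty then false
  else
    let variantIds : PySem.Set String := PySem.Set.ofList (aggregated.map pvVariantIdentifier)
    if !(variantIds.all (fun variantId => pvIsPaperVariant variantId)) then false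
    else
      (variantIds.any (fun v => (PySem.List.pyGetD pvPaperVariantGroups 0 []).contains v)) &&
      (variantIds.any (fun v => (PySem.List.pyGetD pvPaperVariantGroups 1 []).contains v)) &&
      (variantIds.any (fun v => (PySem.List.pyGetD pvPaperVariantGroups 2 []).contains v))

-- ===== PORT B =====
-- _GROUP_OF: the module-level variant -> group-index dict
def pvGroupOf : PySem.Dict String Int :=
  PySem.Dict.ofList [("A9", 0), ("A9_NOROLE", 0), ("B1", 1), ("QAG", 2)]

-- the single pass with three coverage flags and early return False on an unknown variant
def pvAltLoop : List (List (String × String)) → Bool → Bool → Bool → Bool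
  | [], g0, g1, g2 => g0 && g1 && g2
  | item :: rest, g0, g1, g2 =>
    match pvGroupOf.get? (pvVariantIdentifier item) with
    | none => false
    | some idx =>
      if idx = 0 then pvAltLoop rest true g1 g2
      else if idx = 1 then pvAltLoop rest g0 true g2
      else pvAltLoop rest g0 g1 true

def looks_like_paper_selection_py_alt (aggregated : List (List (String × String))) : Bool :=
  pvAltLoop aggregated false false false

-- ===== PRECONDITION & SPEC =====
def Spec_looks_like_paper_selection_py (aggregated : List (List (String × String))) (out : Bool) : Prop := out = looks_like_paper_selection_py_alt aggregated
instance (aggregated : List (List (String × String))) (out : Bool) : Decidable (Spec_looks_like_paper_selection_py aggregated out) := by unfold Spec_looks_like_paper_selection_py; infer_instance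

-- ===== CLAIM (what is proved, stated in full; the proofs are below) =====
def Claim_equal_looks_like_paper_selection_py : Prop := ∀ (aggregated : List (List (String × String))), Dom_looks_like_paper_selection_py aggregated → Spec_looks_like_paper_selection_py aggregated (looks_like_paper_selection_py aggregated)

-- ===== LEMMAS AND PROOFS =====

-- the lookup dict, characterised per possible key
lemma pvGroupOf_spec (v : String) : pvGroupOf.get? v =
    if v = "A9" then some 0 else if v = "A9_NOROLE" then some 0
    else if v = "B1" then some 1 else if v = "QAG" then some 2 else none := by
  by_cases h1 : v = "A9"
  · subst h1; decide
  by_cases h2 : v = "A9_NOROLE"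
  · subst h2; decide
  by_cases h3 : v = "B1"
  · subst h3; decide
  by_cases h4 : v = "QAG"
  · subst h4; decide
  have e : pvGroupOf = PySem.Dict.mk [("A9", 0), ("A9_NOROLE", 0), ("B1", 1), ("QAG", 2)] := by decide
  rw [e]
  simp only [PySem.Dict.get?_mk_cons, beq_iff_eq]
  rw [if_neg (fun h => h1 h.symm), if_neg (fun h => h2 h.symm), if_neg (fun h => h3 h.symm),
      if_neg (fun h => h4 h.symm), if_neg h1, if_neg h2, if_neg h3, if_neg h4]
  rfl

-- A's per-variant tests, expressed through B's dict lookup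
lemma pvEltPaper (v : String) : pvIsPaperVariant v = (pvGroupOf.get? v).isSome := by
  by_cases h1 : v = "A9"
  · subst h1; decide
  by_cases h2 : v = "A9_NOROLE"
  · subst h2; decide
  by_cases h3 : v = "B1"
  · subst h3; decide
  by_cases h4 : v = "QAG"
  · subst h4; decide
  rw [pvGroupOf_spec, if_neg h1, if_neg h2, if_neg h3, if_neg h4]
  simp [pvIsPaperVariant, pvPaperVariantGroups, h1, h2, h3, h4]

lemma pvElt0 (v : String) :
    (PySem.List.pyGetD pvPaperVariantGroups 0 []).contains v = (pvGroupOf.get? v == some 0) := by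
  by_cases h1 : v = "A9"
  · subst h1; decide
  by_cases h2 : v = "A9_NOROLE"
  · subst h2; decide
  by_cases h3 : v = "B1"
  · subst h3; decide
  by_cases h4 : v = "QAG"
  · subst h4; decide
  rw [pvGroupOf_spec, if_neg h1, if_neg h2, if_neg h3, if_neg h4]
  have e : PySem.List.pyGetD pvPaperVariantGroups 0 [] = ["A9", "A9_NOROLE"] := by decide
  rw [e]; simp [h1, h2]

lemma pvElt1 (v : String) :
    (PySem.List.pyGetD pvPaperVariantGroups 1 []).contains v = (pvGroupOf.get? v == some 1) := by
  by_cases h1 : v = "A9"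
  · subst h1; decide
  by_cases h2 : v = "A9_NOROLE"
  · subst h2; decide
  by_cases h3 : v = "B1"
  · subst h3; decide
  by_cases h4 : v = "QAG"
  · subst h4; decide
  rw [pvGroupOf_spec, if_neg h1, if_neg h2, if_neg h3, if_neg h4]
  have e : PySem.List.pyGetD pvPaperVariantGroups 1 [] = ["B1"] := by decide
  rw [e]; simp [h3]

lemma pvElt2 (v : String) :
    (PySem.List.pyGetD pvPaperVariantGroups 2 []).contains v = (pvGroupOf.get? v == some 2) := by
  by_cases h1 : v = "A9"
  · subst h1; decide
  by_cases h2 : v = "A9_NOROLE"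
  · subst h2; decide
  by_cases h3 : v = "B1"
  · subst h3; decide
  by_cases h4 : v = "QAG"
  · subst h4; decide
  rw [pvGroupOf_spec, if_neg h1, if_neg h2, if_neg h3, if_neg h4]
  have e : PySem.List.pyGetD pvPaperVariantGroups 2 [] = ["QAG"] := by decide
  rw [e]; simp [h4]

-- all/any are invariant under the dedup that set(...) performs
lemma pvAllOfList {α : Type} [BEq α] [LawfulBEq α] (xs : List α) (p : α → Bool) :
    (PySem.Set.ofList xs).all p = xs.all p := by
  rw [Bool.eq_iff_iff]; simp [List.all_eq_true, PySem.Set.mem_ofList]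

lemma pvAnyOfList {α : Type} [BEq α] [LawfulBEq α] (xs : List α) (p : α → Bool) :
    (PySem.Set.ofList xs).any p = xs.any p := by
  rw [Bool.eq_iff_iff]; simp [List.any_eq_true, PySem.Set.mem_ofList]

-- B's loop in closed form
lemma pvAltLoop_spec (xs : List (List (String × String))) :
    ∀ g0 g1 g2, pvAltLoop xs g0 g1 g2 =
      ((xs.all (fun it => (pvGroupOf.get? (pvVariantIdentifier it)).isSome)) &&
       (g0 || xs.any (fun it => pvGroupOf.get? (pvVariantIdentifier it) == some 0)) &&
       (g1 || xs.any (fun it => pvGroupOf.get? (pvVariantIdentifier it) == some 1)) &&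
       (g2 || xs.any (fun it => pvGroupOf.get? (pvVariantIdentifier it) == some 2))) := by
  induction xs with
  | nil => intro g0 g1 g2; simp [pvAltLoop]
  | cons item rest ih =>
    intro g0 g1 g2
    rw [pvAltLoop]
    rcases h : pvGroupOf.get? (pvVariantIdentifier item) with _ | idx
    · simp [h]
    · have hidx : idx = 0 ∨ idx = 1 ∨ idx = 2 := by
        rw [pvGroupOf_spec] at h
        split_ifs at h <;> simp_all
      rcases hidx with rfl | rfl | rfl
      · simp [ih, h]
      · simp [ih, h]
      · simp [ih, h]

-- ===== VERDICT (by name: the statement is the Claim_ definition above) =====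
theorem looks_like_paper_selection_py_spec : Claim_equal_looks_like_paper_selection_py := by
  intro aggregated _
  unfold Spec_looks_like_paper_selection_py looks_like_paper_selection_py looks_like_paper_selection_py_alt
  rw [pvAltLoop_spec]
  cases aggregated with
  | nil => rfl
  | cons a as =>
    simp only [List.isEmpty_cons, Bool.false_eq_true, if_false,
      pvAllOfList, pvAnyOfList, List.all_map, List.any_map, Function.comp_def,
      pvEltPaper, pvElt0, pvElt1, pvElt2, Bool.false_or]
    cases hX : (a :: as).all (fun it => (pvGroupOf.get? (pvVariantIdentifier it)).isSome) <;>
      simp
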